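-- pv_equiv track=rewrite | github.com/plan-reuse/subtask_reuse | old_code/manual_runner_v1.py | parse_subtasks_and_goals
-- ===== SOURCE A (Python) =====
-- def parse_subtasks_and_goals(plan_text):
--     """Parse the subtasks file to extract subtasks and PDDL goals"""
--     lines = plan_text.strip().split('\n')
--     subtasks = []
--     pddl_goals = []
--
--     current_subtask = ""
--     current_goals = []
--
--     for line in lines:
--         line = line.strip()
--         if not line:
--             continue
--
--         if line.startswith("Subtask"):
--             # Save previous subtask if exists
--             if current_subtask and current_goals:
--                 subtasks.append(current_subtask)
--                 # Join multiple goals with 'and' if there are multiple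
--                 if len(current_goals) == 1:
--                     pddl_goals.append(current_goals[0])
--                 else:
--                     combined_goal = "(and " + " ".join(current_goals) + ")"
--                     pddl_goals.append(combined_goal)
--
--             # Start new subtask
--             current_subtask = line.split(":", 1)[1].strip() if ":" in line else ""
--             current_goals = []
--
--         elif line.startswith("PDDL Goal"):
--             goal = line.split(":", 1)[1].strip() if ":" in line else ""
--             if goal:
--                 current_goals.append(goal)
--
--     # Add the last subtask
--     if current_subtask and current_goals:
--         subtasks.append(current_subtask)
--         if len(current_goals) == 1:
--             pddl_goals.append(current_goals[0])
--         else: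
--             combined_goal = "(and " + " ".join(current_goals) + ")"
--             pddl_goals.append(combined_goal)
--
--     return subtasks, pddl_goals
-- ===== SOURCE B (Python) =====
-- def parse_subtasks_and_goals(plan_text):
--     """Parse the subtasks file to extract subtasks and PDDL goals"""
--     # Pass 1: materialise the blocks (subtask name, list of goals)
--     blocks = []
--     for raw in plan_text.strip().split('\n'):
--         line = raw.strip()
--         if not line:
--             continue
--         if line.startswith("Subtask"):
--             name = line.split(":", 1)[1].strip() if ":" in line else ""
--             blocks.append((name, []))
--         elif line.startswith("PDDL Goal") and blocks:
--             goal = line.split(":", 1)[1].strip() if ":" in line else ""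
--             if goal:
--                 blocks[-1][1].append(goal)
--     # Pass 2: render the blocks that have a name and at least one goal
--     subtasks = []
--     pddl_goals = []
--     for name, goals in blocks:
--         if name and goals:
--             subtasks.append(name)
--             pddl_goals.append(goals[0] if len(goals) == 1 else "(and " + " ".join(goals) + ")")
--     return subtasks, pddl_goals
-- ===== Notes on version B (the rewrite author's own statement) =====
-- stated objective: simpler
-- what changed: Replaces A's streaming parser with four pieces of mutable state and a duplicated flush (inline and at end-of-loop) by two passes: first materialise a list of (name, goals) blocks, then render the blocks with a truthy name and at least one goal.
import Mathlib
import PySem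

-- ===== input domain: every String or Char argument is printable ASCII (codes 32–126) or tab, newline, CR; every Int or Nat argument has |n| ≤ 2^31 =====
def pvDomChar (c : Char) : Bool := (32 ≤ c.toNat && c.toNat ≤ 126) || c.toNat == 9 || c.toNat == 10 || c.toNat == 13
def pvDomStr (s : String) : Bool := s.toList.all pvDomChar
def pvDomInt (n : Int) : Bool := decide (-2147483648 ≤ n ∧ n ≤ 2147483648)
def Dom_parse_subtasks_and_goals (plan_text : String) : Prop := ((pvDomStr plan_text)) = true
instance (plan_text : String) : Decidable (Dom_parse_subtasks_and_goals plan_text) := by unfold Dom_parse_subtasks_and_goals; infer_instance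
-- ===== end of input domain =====

-- B replaces A's streaming parser (4 mutable state vars, flush duplicated inline and after the
-- loop) by two passes: materialise (name, goals) blocks, then render the valid ones. Simpler.

-- `line.split(":", 1)[1].strip() if ":" in line else ""` — shared expression of both Pythons.
-- Exact: with ":" in line, splitMax? returns exactly two pieces, so index 1 is in range.
def pvColonTail (line : String) : String :=
  if PySem.Str.isIn ":" line then
    PySem.Str.strip (((PySem.Str.splitMax? line ":" 1).getD []).getD 1 "")
  else ""

-- `goals[0] if len(goals)==1 else "(and " + " ".join(goals) + ")"` — identical in both Pythons.
def pvEmitGoal (goals : List String) : String :=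
  if goals.length = 1 then goals.getD 0 ""
  else "(and " ++ PySem.Str.join " " goals ++ ")"

-- ===== PORT A =====
-- A's loop: state (subtasks, pddl_goals, current_subtask, current_goals); flush at Subtask and at end.
def pvLoopA : List String → List String → List String → String → List String → List String × List String
  | [], subs, goals, cn, cg =>
      if cn ≠ "" ∧ cg ≠ [] then (subs ++ [cn], goals ++ [pvEmitGoal cg]) else (subs, goals)
  | l :: ls, subs, goals, cn, cg =>
      let line := PySem.Str.strip l
      if line = "" then pvLoopA ls subs goals cn cg
      else if PySem.Str.startswith line "Subtask" then
        if cn ≠ "" ∧ cg ≠ [] then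
          pvLoopA ls (subs ++ [cn]) (goals ++ [pvEmitGoal cg]) (pvColonTail line) []
        else
          pvLoopA ls subs goals (pvColonTail line) []
      else if PySem.Str.startswith line "PDDL Goal" then
        if pvColonTail line ≠ "" then pvLoopA ls subs goals cn (cg ++ [pvColonTail line])
        else pvLoopA ls subs goals cn cg
      else pvLoopA ls subs goals cn cg

def parse_subtasks_and_goals (plan_text : String) : List String × List String :=
  pvLoopA ((PySem.Str.split? (PySem.Str.strip plan_text) "\n").getD []) [] [] "" []

-- ===== PORT B =====
-- `blocks[-1][1].append(goal)` : rebuild the list with the last element modified.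
def pvUpdateLast {α : Type} (f : α → α) : List α → List α
  | [] => []
  | [x] => [f x]
  | x :: xs => x :: pvUpdateLast f xs

-- pass 1 step: one line updates the block list
def pvStepB (blocks : List (String × List String)) (l : String) : List (String × List String) :=
  let line := PySem.Str.strip l
  if line = "" then blocks
  else if PySem.Str.startswith line "Subtask" then blocks ++ [(pvColonTail line, [])]
  else if PySem.Str.startswith line "PDDL Goal" ∧ blocks ≠ [] then
    if pvColonTail line ≠ "" then pvUpdateLast (fun b => (b.1, b.2 ++ [pvColonTail line])) blocks
    else blocks
  else blocks

-- pass 2 step: render one block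
def pvRenderStep (acc : List String × List String) (b : String × List String) : List String × List String :=
  if b.1 ≠ "" ∧ b.2 ≠ [] then (acc.1 ++ [b.1], acc.2 ++ [pvEmitGoal b.2]) else acc

def parse_subtasks_and_goals_alt (plan_text : String) : List String × List String :=
  ((((PySem.Str.split? (PySem.Str.strip plan_text) "\n").getD []).foldl pvStepB []).foldl pvRenderStep ([], []))

-- ===== PRECONDITION & SPEC =====
def Spec_parse_subtasks_and_goals (plan_text : String) (out : List String × List String) : Prop := out = parse_subtasks_and_goals_alt plan_text
instance (plan_text : String) (out : List String × List String) : Decidable (Spec_parse_subtasks_and_goals plan_text out) := by unfold Spec_parse_subtasks_and_goals; infer_instance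

-- ===== CLAIM (what is proved, stated in full; the proofs are below) =====
def Claim_equal_parse_subtasks_and_goals : Prop := ∀ (plan_text : String), Dom_parse_subtasks_and_goals plan_text → Spec_parse_subtasks_and_goals plan_text (parse_subtasks_and_goals plan_text)

-- ===== LEMMAS AND PROOFS =====

-- proof-only: the block list seen "recursively", the open block carried as (cn, cg)
def pvBlocksRec : List String → String → List String → List (String × List String)
  | [], cn, cg => [(cn, cg)]
  | l :: ls, cn, cg =>
      let line := PySem.Str.strip l
      if line = "" then pvBlocksRec ls cn cg
      else if PySem.Str.startswith line "Subtask" then (cn, cg) :: pvBlocksRec ls (pvColonTail line) []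
      else if PySem.Str.startswith line "PDDL Goal" then
        if pvColonTail line ≠ "" then pvBlocksRec ls cn (cg ++ [pvColonTail line])
        else pvBlocksRec ls cn cg
      else pvBlocksRec ls cn cg

lemma renderStep_pair (acc : List String × List String) (cn : String) (cg : List String) :
    pvRenderStep acc (cn, cg)
      = if cn ≠ "" ∧ cg ≠ [] then (acc.1 ++ [cn], acc.2 ++ [pvEmitGoal cg]) else acc := rfl

lemma pvUpdateLast_snoc {α : Type} (f : α → α) (xs : List α) (x : α) :
    pvUpdateLast f (xs ++ [x]) = xs ++ [f x] := by
  induction xs with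
  | nil => rfl
  | cons a as ih =>
    cases as with
    | nil => simp [pvUpdateLast]
    | cons b bs => simpa [pvUpdateLast] using ih

-- A's loop = fold of the render step over the recursive block list
lemma loopA_eq_render (ls : List String) :
    ∀ subs goals cn cg, pvLoopA ls subs goals cn cg
      = (pvBlocksRec ls cn cg).foldl pvRenderStep (subs, goals) := by
  induction ls with
  | nil =>
    intro subs goals cn cg
    simp [pvLoopA, pvBlocksRec, List.foldl, renderStep_pair]
  | cons l ls ih =>
    intro subs goals cn cg
    simp only [pvLoopA, pvBlocksRec]
    by_cases h1 : PySem.Str.strip l = ""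
    · simp only [if_pos h1]; exact ih subs goals cn cg
    · simp only [if_neg h1]
      by_cases h2 : PySem.Str.startswith (PySem.Str.strip l) "Subtask" = true
      · simp only [if_pos h2, List.foldl, renderStep_pair]
        by_cases hf : cn ≠ "" ∧ cg ≠ []
        · simp only [if_pos hf]; exact ih _ _ _ _
        · simp only [if_neg hf]; exact ih _ _ _ _
      · simp only [if_neg h2]
        by_cases h3 : PySem.Str.startswith (PySem.Str.strip l) "PDDL Goal" = true
        · simp only [if_pos h3]
          by_cases h4 : pvColonTail (PySem.Str.strip l) ≠ ""
          · simp only [if_pos h4]; exact ih _ _ _ _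
          · simp only [if_neg h4]; exact ih _ _ _ _
        · simp only [if_neg h3]; exact ih _ _ _ _

-- pass 1 started from a nonempty block list extends it exactly like pvBlocksRec
lemma stepB_snoc (ls : List String) :
    ∀ (bs : List (String × List String)) cn cg,
      ls.foldl pvStepB (bs ++ [(cn, cg)]) = bs ++ pvBlocksRec ls cn cg := by
  induction ls with
  | nil => intro bs cn cg; simp [pvBlocksRec]
  | cons l ls ih =>
    intro bs cn cg
    simp only [List.foldl, pvStepB, pvBlocksRec]
    by_cases h1 : PySem.Str.strip l = ""
    · simp only [if_pos h1]; exact ih bs cn cg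
    · simp only [if_neg h1]
      by_cases h2 : PySem.Str.startswith (PySem.Str.strip l) "Subtask" = true
      · simp only [if_pos h2]
        rw [ih (bs ++ [(cn, cg)])]
        simp
      · simp only [if_neg h2]
        by_cases h3 : PySem.Str.startswith (PySem.Str.strip l) "PDDL Goal" = true
        · have hc : PySem.Str.startswith (PySem.Str.strip l) "PDDL Goal" = true
              ∧ bs ++ [(cn, cg)] ≠ [] := ⟨h3, by simp⟩
          simp only [if_pos hc, if_pos h3]
          by_cases h4 : pvColonTail (PySem.Str.strip l) ≠ ""
          · simp only [if_pos h4, pvUpdateLast_snoc]; exact ih bs cn _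
          · simp only [if_neg h4]; exact ih bs cn cg
        · have hc : ¬(PySem.Str.startswith (PySem.Str.strip l) "PDDL Goal" = true
              ∧ bs ++ [(cn, cg)] ≠ []) := fun h => h3 h.1
          simp only [if_neg hc, if_neg h3]; exact ih bs cn cg

lemma stepB_singleton (ls : List String) (cn : String) (cg : List String) :
    ls.foldl pvStepB [(cn, cg)] = pvBlocksRec ls cn cg := by
  simpa using stepB_snoc ls [] cn cg

-- rendering pvBlocksRec from the unnamed seed block = rendering B's pass-1 block list
lemma render_seed (ls : List String) :
    ∀ cg acc, (pvBlocksRec ls "" cg).foldl pvRenderStep acc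
      = (ls.foldl pvStepB []).foldl pvRenderStep acc := by
  induction ls with
  | nil => intro cg acc; simp [pvBlocksRec, List.foldl, renderStep_pair]
  | cons l ls ih =>
    intro cg acc
    simp only [pvBlocksRec, List.foldl, pvStepB]
    by_cases h1 : PySem.Str.strip l = ""
    · simp only [if_pos h1]; exact ih cg acc
    · simp only [if_neg h1]
      by_cases h2 : PySem.Str.startswith (PySem.Str.strip l) "Subtask" = true
      · simp only [if_pos h2, List.foldl, renderStep_pair, List.nil_append]
        have hseed : ¬((("" : String) ≠ "") ∧ cg ≠ []) := by simp
        simp only [if_neg hseed]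
        rw [stepB_singleton]
      · by_cases h3 : PySem.Str.startswith (PySem.Str.strip l) "PDDL Goal" = true
        · have hc : ¬(PySem.Str.startswith (PySem.Str.strip l) "PDDL Goal" = true
              ∧ ([] : List (String × List String)) ≠ []) := by simp
          simp only [if_neg h2, if_pos h3, if_neg hc]
          by_cases h4 : pvColonTail (PySem.Str.strip l) ≠ ""
          · simp only [if_pos h4]; exact ih _ acc
          · simp only [if_neg h4]; exact ih cg acc
        · have hc : ¬(PySem.Str.startswith (PySem.Str.strip l) "PDDL Goal" = true
              ∧ ([] : List (String × List String)) ≠ []) := fun h => h3 h.1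
          simp only [if_neg h2, if_neg h3, if_neg hc]; exact ih cg acc

-- ===== VERDICT (by name: the statement is the Claim_ definition above) =====
theorem parse_subtasks_and_goals_spec : Claim_equal_parse_subtasks_and_goals := by
  intro plan_text _
  show parse_subtasks_and_goals plan_text = parse_subtasks_and_goals_alt plan_text
  unfold parse_subtasks_and_goals parse_subtasks_and_goals_alt
  rw [loopA_eq_render, render_seed]
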